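-- pv_equiv track=rewrite | github.com/camillinaa/rnaseq-agent | src/utils.py | clean_generated_code
-- ===== SOURCE A (Python) =====
-- def clean_generated_code(code):
--         """Clean LLM generated code"""
--         # Remove markdown code blocks
--         if code.startswith("```python"):
--             code = code.replace("```python", "").replace("```", "")
--         if code.startswith("```"):
--             code = code.replace("```", "")
--
--         # Remove explanatory text before the code
--         lines = code.strip().split('\n')
--         clean_lines = []
--         code_started = False
--
--         for line in lines:
--             if line.strip().startswith('import') or line.strip().startswith('fig') or code_started:
--                 code_started = True
--                 clean_lines.append(line)
--
--         return '\n'.join(clean_lines)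
-- ===== SOURCE B (Python) =====
-- def clean_generated_code(code):
--     """Clean LLM generated code"""
--     if code.startswith("```python"):
--         code = code.replace("```python", "").replace("```", "")
--     if code.startswith("```"):
--         code = code.replace("```", "")
--     lines = code.strip().split('\n')
--     idx = next((i for i, line in enumerate(lines)
--                 if line.strip().startswith('import') or line.strip().startswith('fig')),
--                None)
--     return '' if idx is None else '\n'.join(lines[idx:])
-- ===== Notes on version B (the rewrite author's own statement) =====
-- stated objective: simpler
-- what changed: Replaces the code_started boolean threaded through an accumulator loop with a find-first-matching-index (next over enumerate) followed by a single join of the line-list suffix from that index, empty string when no line matches.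
import Mathlib
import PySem

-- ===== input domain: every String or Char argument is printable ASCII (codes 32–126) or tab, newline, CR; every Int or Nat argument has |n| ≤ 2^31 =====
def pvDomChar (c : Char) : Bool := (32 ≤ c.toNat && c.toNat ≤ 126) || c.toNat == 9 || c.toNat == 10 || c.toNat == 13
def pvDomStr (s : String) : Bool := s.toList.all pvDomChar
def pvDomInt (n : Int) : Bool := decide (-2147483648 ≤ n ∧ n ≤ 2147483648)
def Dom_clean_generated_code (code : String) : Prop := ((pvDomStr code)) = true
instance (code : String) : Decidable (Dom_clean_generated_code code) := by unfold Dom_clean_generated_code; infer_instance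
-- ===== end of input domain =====

-- B replaces the code_started boolean accumulator loop by finding the index of the
-- first 'import'/'fig' line and slicing; objective: simpler.

-- ===== PORT A =====
-- the per-line test of A's loop
def pvLinePred (line : String) : Bool :=
  PySem.Str.startswith (PySem.Str.strip line) "import" || PySem.Str.startswith (PySem.Str.strip line) "fig"

-- A's loop step over state (clean_lines, code_started)
def pvStepA (acc : List String × Bool) (line : String) : List String × Bool :=
  if pvLinePred line || acc.2 then (acc.1 ++ [line], true) else acc

def clean_generated_code (code : String) : String :=
  let code := if PySem.Str.startswith code "```python"
    then PySem.Str.replace (PySem.Str.replace code "```python" "") "```" "" else code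
  let code := if PySem.Str.startswith code "```"
    then PySem.Str.replace code "```" "" else code
  let lines := (PySem.Str.split? (PySem.Str.strip code) "\n").getD []
  let res := lines.foldl pvStepA ([], false)
  PySem.Str.join "\n" res.1

-- ===== PORT B =====
-- B's 'return "" if idx is None else "\\n".join(lines[idx:])'
def pvJoinFrom (lines : List String) (idx? : Option Nat) : String :=
  match idx? with
  | some i => PySem.Str.join "\n" (lines.drop i)
  | none => ""

def clean_generated_code_alt (code : String) : String :=
  let code := if PySem.Str.startswith code "```python"
    then PySem.Str.replace (PySem.Str.replace code "```python" "") "```" "" else code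
  let code := if PySem.Str.startswith code "```"
    then PySem.Str.replace code "```" "" else code
  let lines := (PySem.Str.split? (PySem.Str.strip code) "\n").getD []
  pvJoinFrom lines (lines.findIdx? (fun line =>
      PySem.Str.startswith (PySem.Str.strip line) "import"
      || PySem.Str.startswith (PySem.Str.strip line) "fig"))

-- ===== PRECONDITION & SPEC =====
def Spec_clean_generated_code (code : String) (out : String) : Prop := out = clean_generated_code_alt code
instance (code : String) (out : String) : Decidable (Spec_clean_generated_code code out) := by unfold Spec_clean_generated_code; infer_instance

-- ===== CLAIM (what is proved, stated in full; the proofs are below) =====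
def Claim_equal_clean_generated_code : Prop := ∀ (code : String), Dom_clean_generated_code code → Spec_clean_generated_code code (clean_generated_code code)

-- ===== LEMMAS AND PROOFS =====

-- once the flag is set, the rest of the fold just appends every line
theorem foldA_true (ls : List String) (acc : List String) :
    ls.foldl pvStepA (acc, true) = (acc ++ ls, true) := by
  induction ls generalizing acc with
  | nil => simp
  | cons l rest ih =>
      simp only [List.foldl, pvStepA]
      simp [ih]

-- with the flag unset, the fold's output is the suffix from the first matching line
theorem foldA_false (ls : List String) (acc : List String) :
    (ls.foldl pvStepA (acc, false)).1
      = acc ++ (match ls.findIdx? pvLinePred with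
                | some i => ls.drop i
                | none => []) := by
  induction ls generalizing acc with
  | nil => simp
  | cons l rest ih =>
      by_cases h : pvLinePred l
      · simp only [List.foldl, pvStepA, h, Bool.true_or, if_pos]
        rw [foldA_true]
        simp [List.findIdx?_cons, h]
      · simp only [List.foldl, pvStepA, h, Bool.false_or, Bool.false_eq_true, if_false]
        rw [ih]
        simp only [List.findIdx?_cons, h]
        cases List.findIdx? pvLinePred rest with
        | none => simp
        | some i => simp [List.drop_succ_cons]

theorem join_match (lines : List String) :
    PySem.Str.join "\n" (match List.findIdx? pvLinePred lines with
      | some i => lines.drop i | none => ([] : List String))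
    = pvJoinFrom lines (List.findIdx? pvLinePred lines) := by
  cases List.findIdx? pvLinePred lines <;> rfl

-- ===== VERDICT (by name: the statement is the Claim_ definition above) =====
theorem main_on_lines (lines : List String) :
    PySem.Str.join "\n" (lines.foldl pvStepA ([], false)).1
      = pvJoinFrom lines (List.findIdx? (fun line =>
      PySem.Str.startswith (PySem.Str.strip line) "import"
      || PySem.Str.startswith (PySem.Str.strip line) "fig") lines) := by
  have hp : (fun line =>
      PySem.Str.startswith (PySem.Str.strip line) "import"
      || PySem.Str.startswith (PySem.Str.strip line) "fig") = pvLinePred := rfl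
  rw [hp, foldA_false]
  simp only [List.nil_append]
  exact join_match _

theorem clean_generated_code_spec : Claim_equal_clean_generated_code := by
  intro code _
  unfold Spec_clean_generated_code clean_generated_code clean_generated_code_alt
  exact main_on_lines _
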